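-- pv_equiv track=rewrite | github.com/Dan-jpg2/CSIK_Prog | modul10/o0_to_o5.py | failed_login_count_by_username
-- ===== SOURCE A (Python) =====
-- def failed_login_count_by_username(auth_log):
--     n = len(auth_log)
--     d = {}
--     i = 0
--     while i < n:
--         (_, _, username, result) = auth_log[i]
--
--         if username not in d:
--             #første gang vi ser brugeren, starter vi tælling
--             d[username] = 1 if result == 'failure' else 0
--         else:
--             # senere, tæl kun hvis fejl
--             if result == 'failure':
--                 d[username] = d[username] + 1
--         i += 1
--     return d
-- ===== SOURCE B (Python) =====
-- def failed_login_count_by_username(auth_log):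
--     # pass 1: count only the failure rows
--     counts = {}
--     for u in (u for (_, _, u, r) in auth_log if r == 'failure'):
--         counts[u] = counts.get(u, 0) + 1
--     # pass 2: one entry per username in first-appearance order, defaulting to 0
--     return {u: counts.get(u, 0) for (_, _, u, _) in auth_log}
-- ===== Notes on version B (the rewrite author's own statement) =====
-- stated objective: idiomatic
-- what changed: Replaces A's single conditional-increment pass over an index-driven while loop by two differently-shaped passes: a filter-and-count over only the failure rows, then a dict comprehension over all usernames projecting each to its failure count (default 0), which reproduces first-appearance key order.
import Mathlib
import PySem

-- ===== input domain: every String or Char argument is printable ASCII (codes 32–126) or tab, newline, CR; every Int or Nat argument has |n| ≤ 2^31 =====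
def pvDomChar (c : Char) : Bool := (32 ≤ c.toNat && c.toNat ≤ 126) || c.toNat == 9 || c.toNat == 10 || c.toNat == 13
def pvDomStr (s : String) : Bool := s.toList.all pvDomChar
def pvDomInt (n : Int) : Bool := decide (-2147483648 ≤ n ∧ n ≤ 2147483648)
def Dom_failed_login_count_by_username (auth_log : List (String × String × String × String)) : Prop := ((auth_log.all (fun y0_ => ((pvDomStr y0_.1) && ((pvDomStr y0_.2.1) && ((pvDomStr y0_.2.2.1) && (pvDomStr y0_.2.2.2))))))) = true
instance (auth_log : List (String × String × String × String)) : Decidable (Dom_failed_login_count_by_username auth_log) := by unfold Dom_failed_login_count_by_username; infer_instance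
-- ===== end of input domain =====

-- ===== PORT A =====
-- B builds a failure-only counter in one pass and projects every username onto it in a second
-- pass, instead of A's single conditional-increment while loop (objective: idiomatic).
-- A's 'while i < n' reads auth_log[i] for i = 0..n-1, i.e. it visits the list elements in
-- order; ported as a foldl over the list carrying the same dict state, branches in order.
def failed_login_count_by_username (auth_log : List (String × String × String × String)) : List (String × Int) :=
  (auth_log.foldl (fun d y =>
      if d.contains y.2.2.1 = false then
        d.insert y.2.2.1 (if y.2.2.2 == "failure" then (1 : Int) else 0)
      else
        if y.2.2.2 == "failure" then d.insert y.2.2.1 (d.getD y.2.2.1 0 + 1) else d)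
    PySem.Dict.empty).items

-- ===== PORT B =====
-- counts = {}; for u in (u for (_,_,u,r) in auth_log if r == 'failure'): counts[u] = counts.get(u,0)+1
-- return {u: counts.get(u, 0) for (_, _, u, _) in auth_log}
def failed_login_count_by_username_alt (auth_log : List (String × String × String × String)) : List (String × Int) :=
  let counts := ((auth_log.filter (fun y => y.2.2.2 == "failure")).map (fun y => y.2.2.1)).foldl
      (fun d u => d.insert u (d.getD u 0 + 1)) PySem.Dict.empty
  (auth_log.foldl (fun d y => d.insert y.2.2.1 (counts.getD y.2.2.1 0)) PySem.Dict.empty).items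

-- ===== PRECONDITION & SPEC =====
def Spec_failed_login_count_by_username (auth_log : List (String × String × String × String)) (out : List (String × Int)) : Prop := out = failed_login_count_by_username_alt auth_log
instance (auth_log : List (String × String × String × String)) (out : List (String × Int)) : Decidable (Spec_failed_login_count_by_username auth_log out) := by unfold Spec_failed_login_count_by_username; infer_instance

-- ===== CLAIM (what is proved, stated in full; the proofs are below) =====
def Claim_equal_failed_login_count_by_username : Prop := ∀ (auth_log : List (String × String × String × String)), Dom_failed_login_count_by_username auth_log → Spec_failed_login_count_by_username auth_log (failed_login_count_by_username auth_log)

-- ===== LEMMAS AND PROOFS =====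

def pvFc (l : List (String × String × String × String)) (u : String) : Int :=
  (((l.filter (fun y => y.2.2.2 == "failure")).map (fun y => y.2.2.1)).count u : Int)

theorem pvFc_append (t : List (String × String × String × String))
    (y : String × String × String × String) (u : String) :
    pvFc (t ++ [y]) u
      = pvFc t u + (if (y.2.2.2 == "failure") = true ∧ u = y.2.2.1 then 1 else 0) := by
  unfold pvFc
  rw [List.filter_append, List.map_append, List.count_append]
  push_cast
  by_cases hf : (y.2.2.2 == "failure") = true
  · by_cases hu : u = y.2.2.1 <;>
      simp [hf, hu, List.count_nil, eq_comm]
  · simp [hf]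

theorem itemsA (l : List (String × String × String × String)) :
    (l.foldl (fun d y =>
      if d.contains y.2.2.1 = false then
        d.insert y.2.2.1 (if y.2.2.2 == "failure" then (1 : Int) else 0)
      else
        if y.2.2.2 == "failure" then d.insert y.2.2.1 (d.getD y.2.2.1 0 + 1) else d)
      PySem.Dict.empty).items
      = (PySem.Set.ofList (l.map (fun y => y.2.2.1))).map (fun u => (u, pvFc l u)) := by
  induction l using List.reverseRecOn with
  | nil => rfl
  | append_singleton t y ih =>
    rw [List.foldl_append, List.foldl_cons, List.foldl_nil, List.map_append, List.map_cons,
      List.map_nil, PySem.Set.ofList_append, PySem.Set.update_cons, PySem.Set.update_nil]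
    set d := t.foldl (fun d y =>
      if d.contains y.2.2.1 = false then
        d.insert y.2.2.1 (if y.2.2.2 == "failure" then (1 : Int) else 0)
      else
        if y.2.2.2 == "failure" then d.insert y.2.2.1 (d.getD y.2.2.1 0 + 1) else d)
      PySem.Dict.empty with hd
    set S := PySem.Set.ofList (t.map (fun y => y.2.2.1)) with hS
    have hkeys : d.keys = S := by
      show d.items.map (·.1) = S
      rw [ih, List.map_map]
      exact (List.map_congr_left fun w _ => rfl).trans (List.map_id _)
    have hnd : d.keys.Nodup := by rw [hkeys]; exact PySem.Set.nodup_ofList _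
    have hcont : d.contains y.2.2.1 = true ↔ y.2.2.1 ∈ S := by
      rw [PySem.Dict.contains_iff_mem_keys, hkeys]
    by_cases hm : y.2.2.1 ∈ S
    · have hc : d.contains y.2.2.1 = true := hcont.mpr hm
      have hgetD : d.getD y.2.2.1 0 = pvFc t y.2.2.1 :=
        PySem.Dict.getD_of_mem_items _ (by rw [ih]; exact List.mem_map_of_mem hm) hnd 0
      rw [PySem.Set.add_of_mem hm]
      by_cases hf : (y.2.2.2 == "failure") = true
      · simp only [hc, hf, Bool.true_eq_false, if_false, if_true]
        rw [PySem.Dict.items_insert_of_contains _ _ hc, ih, List.map_map]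
        refine List.map_congr_left (fun w _ => ?_)
        by_cases hw : w = y.2.2.1
        · simp [hw, hgetD, pvFc_append, hf]
        · simp [hw, pvFc_append, hf]
      · rw [Bool.not_eq_true] at hf
        simp only [hc, hf, Bool.true_eq_false, Bool.false_eq_true, if_false]
        rw [ih]
        refine List.map_congr_left (fun w _ => ?_)
        rw [pvFc_append]
        simp [hf]
    · have hc : d.contains y.2.2.1 = false := by
        cases h : d.contains y.2.2.1 with
        | true => exact absurd (hcont.mp h) hm
        | false => rfl
      have hm' : y.2.2.1 ∉ t.map (fun y => y.2.2.1) :=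
        fun h => hm ((PySem.Set.mem_ofList _ _).mpr h)
      have hfc0 : pvFc t y.2.2.1 = 0 := by
        unfold pvFc
        rw [List.count_eq_zero.mpr, Int.natCast_zero]
        intro h
        rcases List.mem_map.mp h with ⟨z, hz, hzu⟩
        exact hm' (hzu ▸ List.mem_map_of_mem (List.mem_of_mem_filter hz))
      simp only [hc, if_true]
      rw [PySem.Dict.items_insert_of_not_contains _ _ hc, ih,
        PySem.Set.add_of_not_mem hm, List.map_append, List.map_cons, List.map_nil]
      congr 1
      · refine List.map_congr_left (fun w hw => ?_)
        rw [pvFc_append]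
        have : w ≠ y.2.2.1 := fun h => hm (h ▸ hw)
        simp [this]
      · rw [pvFc_append, hfc0]
        by_cases hf : (y.2.2.2 == "failure") = true <;> simp [hf]

theorem itemsB (l : List (String × String × String × String)) (C : String → Int) :
    (l.foldl (fun d y => d.insert y.2.2.1 (C y.2.2.1)) PySem.Dict.empty).items
      = (PySem.Set.ofList (l.map (fun y => y.2.2.1))).map (fun u => (u, C u)) := by
  induction l using List.reverseRecOn with
  | nil => rfl
  | append_singleton t y ih =>
    rw [List.foldl_append, List.map_append, PySem.Set.ofList_append, List.foldl_cons,
      List.foldl_nil]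
    set d := t.foldl (fun d y => d.insert y.2.2.1 (C y.2.2.1)) PySem.Dict.empty with hd
    set S := PySem.Set.ofList (t.map (fun y => y.2.2.1)) with hS
    have hkeys : d.keys = S := by
      show d.items.map (·.1) = S
      rw [ih, List.map_map]
      exact (List.map_congr_left fun w _ => rfl).trans (List.map_id _)
    have hcont : d.contains y.2.2.1 = true ↔ y.2.2.1 ∈ S := by
      rw [PySem.Dict.contains_iff_mem_keys, hkeys]
    rw [List.map_cons, List.map_nil, PySem.Set.update_cons, PySem.Set.update_nil]
    by_cases hm : y.2.2.1 ∈ S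
    · rw [PySem.Dict.items_insert_of_contains _ _ (hcont.mpr hm), ih,
        PySem.Set.add_of_mem hm, List.map_map]
      refine List.map_congr_left (fun w _ => ?_)
      by_cases hw : w = y.2.2.1 <;> simp [hw]
    · rw [PySem.Dict.items_insert_of_not_contains _ _ (by
          cases h : d.contains y.2.2.1 with
          | true => exact absurd (hcont.mp h) hm
          | false => rfl), ih,
        PySem.Set.add_of_not_mem hm, List.map_append]
      rfl


-- ===== VERDICT (by name: the statement is the Claim_ definition above) =====
theorem failed_login_count_by_username_spec : Claim_equal_failed_login_count_by_username := by
  intro l _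
  unfold Spec_failed_login_count_by_username
  unfold failed_login_count_by_username failed_login_count_by_username_alt
  rw [itemsA]
  simp only [PySem.Dict.foldl_insert_getD_add_one_eq_counter]
  rw [itemsB l (fun u => (PySem.Dict.counter
        ((l.filter (fun y => y.2.2.2 == "failure")).map (fun y => y.2.2.1))).getD u 0)]
  simp only [PySem.Dict.getD_counter]
  rfl
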